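-- pv_equiv track=rewrite | github.com/imraunav/Placement-coding-problems | cypher.py | foo
-- ===== SOURCE A (Python) =====
-- def foo(s):
--     longest = 0
--     running_len = 0
--     subs_len = 0
--     caps_flag = False
--     numbers = '1234567890'
--     caps = 'QWERTYUIOPASDFGHJKLZXCVBNM'
--     for ch in s:
--         if ch in numbers: # if number reset substring tracing
--             caps_flag = False
--             running_len = 0
--             subs_len = 0
--         else:
--             running_len += 1
--
--         if ch in caps: # if found Caps, treat as valid substring
--             caps_flag = True
--
--         if caps_flag == True: # is a valid substring
--             subs_len = running_len
--         longest = max(longest, subs_len)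
--     if longest == 0:
--         return -1
--     else:
--         return longest
-- ===== SOURCE B (Python) =====
-- def foo(s):
--     # Split into maximal digit-free segments, then take the max length
--     # among segments containing an ASCII uppercase letter; -1 if none.
--     segs = []
--     cur = []
--     for ch in s:
--         if '0' <= ch <= '9':
--             segs.append(cur)
--             cur = []
--         else:
--             cur.append(ch)
--     segs.append(cur)
--     lens = [len(seg) for seg in segs if any('A' <= c <= 'Z' for c in seg)]
--     return max(lens) if lens else -1
-- ===== Notes on version B (the rewrite author's own statement) =====
-- stated objective: alternative
-- what changed: Replaces A's fused one-pass state machine (caps flag, running length, running max with per-step resets) by a split-then-scan decomposition: build the maximal digit-free segments first, then take the maximum length of segments containing an uppercase letter, -1 if none.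
import Mathlib
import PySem

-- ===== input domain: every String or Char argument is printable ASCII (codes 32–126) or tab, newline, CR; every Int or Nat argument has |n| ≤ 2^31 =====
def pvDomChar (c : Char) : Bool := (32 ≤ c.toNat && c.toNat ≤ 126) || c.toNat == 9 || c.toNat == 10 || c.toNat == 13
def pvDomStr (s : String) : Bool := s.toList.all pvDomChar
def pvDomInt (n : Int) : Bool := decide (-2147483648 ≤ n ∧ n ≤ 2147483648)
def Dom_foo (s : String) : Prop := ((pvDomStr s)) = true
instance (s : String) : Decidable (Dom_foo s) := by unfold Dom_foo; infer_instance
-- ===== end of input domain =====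

-- B replaces A's fused one-pass state machine by a split-then-scan decomposition
-- (build the maximal digit-free segments, then max length of segments containing
-- an uppercase letter, -1 if none); same O(n) cost, objective: alternative.

-- ===== PORT A =====
-- state = (longest, running_len, subs_len, caps_flag), exactly A's loop body
def fooStep (st : Int × Int × Int × Bool) (ch : Char) : Int × Int × Int × Bool :=
  let p1 : Bool × Int × Int :=
    if "1234567890".toList.contains ch then (false, 0, 0)
    else (st.2.2.2, st.2.1 + 1, st.2.2.1)
  let fl : Bool := if "QWERTYUIOPASDFGHJKLZXCVBNM".toList.contains ch then true else p1.1
  let sl : Int := if fl then p1.2.1 else p1.2.2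
  (max st.1 sl, p1.2.1, sl, fl)

def foo (s : String) : Int :=
  let st := s.toList.foldl fooStep (0, 0, 0, false)
  if st.1 = 0 then -1 else st.1

-- ===== PORT B =====
-- any('A' <= c <= 'Z' for c in seg)
def hasUp (seg : List Char) : Bool := seg.any (fun c => decide ('A' ≤ c ∧ c ≤ 'Z'))

-- loop body: on a digit close the current segment, else extend it
def fooAltStep (st : List (List Char) × List Char) (ch : Char) : List (List Char) × List Char :=
  if '0' ≤ ch ∧ ch ≤ '9' then (st.1 ++ [st.2], ([] : List Char)) else (st.1, st.2 ++ [ch])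

def foo_alt (s : String) : Int :=
  let st := s.toList.foldl fooAltStep ([], [])
  let segs := st.1 ++ [st.2]
  let lens := (segs.filter hasUp).map (fun seg => (seg.length : Int))
  match lens with
  | [] => -1
  | x :: t => t.foldl max x  -- max(lens): Python's running-max loop

-- ===== PRECONDITION & SPEC =====
def Spec_foo (s : String) (out : Int) : Prop := out = foo_alt s
instance (s : String) (out : Int) : Decidable (Spec_foo s out) := by unfold Spec_foo; infer_instance

-- ===== CLAIM (what is proved, stated in full; the proofs are below) =====
def Claim_equal_foo : Prop := ∀ (s : String), Dom_foo s → Spec_foo s (foo s)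

-- ===== LEMMAS AND PROOFS =====

def cand (seg : List Char) : Int := if hasUp seg then (seg.length : Int) else 0

def candMax (segs : List (List Char)) : Int := segs.foldl (fun m seg => max m (cand seg)) 0

theorem digit_mem (ch : Char) :
    ("1234567890".toList.contains ch) = decide ('0' ≤ ch ∧ ch ≤ '9') := by
  have h : "1234567890".toList = ['1','2','3','4','5','6','7','8','9','0'] := rfl
  rw [h, Bool.eq_iff_iff]
  rcases ch with ⟨v, hv⟩
  simp only [List.contains_cons, List.contains_nil, Bool.or_false, Bool.or_eq_true,
    beq_iff_eq, decide_eq_true_eq, Char.le_def, Char.ext_iff]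
  constructor
  · rintro (h|h|h|h|h|h|h|h|h|h) <;> subst h <;> exact ⟨by decide, by decide⟩
  · rintro ⟨h1, h2⟩
    simp only [UInt32.le_iff_toNat_le, ← UInt32.toNat_inj, Char.reduceVal, UInt32.reduceToNat] at h1 h2 ⊢
    omega

theorem upper_mem (ch : Char) :
    ("QWERTYUIOPASDFGHJKLZXCVBNM".toList.contains ch) = decide ('A' ≤ ch ∧ ch ≤ 'Z') := by
  have h : "QWERTYUIOPASDFGHJKLZXCVBNM".toList =
      ['Q','W','E','R','T','Y','U','I','O','P','A','S','D','F','G','H','J','K','L','Z','X','C','V','B','N','M'] := rfl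
  rw [h, Bool.eq_iff_iff]
  rcases ch with ⟨v, hv⟩
  simp only [List.contains_cons, List.contains_nil, Bool.or_false, Bool.or_eq_true,
    beq_iff_eq, decide_eq_true_eq, Char.le_def, Char.ext_iff]
  constructor
  · rintro (h|h|h|h|h|h|h|h|h|h|h|h|h|h|h|h|h|h|h|h|h|h|h|h|h|h) <;> subst h <;> exact ⟨by decide, by decide⟩
  · rintro ⟨h1, h2⟩
    simp only [UInt32.le_iff_toNat_le, ← UInt32.toNat_inj, Char.reduceVal, UInt32.reduceToNat] at h1 h2 ⊢
    omega

theorem digit_not_upper (ch : Char) (h : '0' ≤ ch ∧ ch ≤ '9') : ¬ ('A' ≤ ch ∧ ch ≤ 'Z') := by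
  rcases h with ⟨h1, h2⟩
  rintro ⟨h3, h4⟩
  simp only [Char.le_def, UInt32.le_iff_toNat_le, Char.reduceVal, UInt32.reduceToNat] at h1 h2 h3 h4
  omega

theorem cand_nonneg (seg : List Char) : 0 ≤ cand seg := by
  unfold cand; split <;> omega

theorem hasUp_append (cur : List Char) (ch : Char) :
    hasUp (cur ++ [ch]) = (hasUp cur || decide ('A' ≤ ch ∧ ch ≤ 'Z')) := by
  simp [hasUp]

theorem candMax_append (segs : List (List Char)) (cur : List Char) :
    candMax (segs ++ [cur]) = max (candMax segs) (cand cur) := by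
  simp [candMax, List.foldl_append]

theorem cand_le_len (seg : List Char) : cand seg ≤ (seg.length : Int) := by
  unfold cand; split <;> omega

theorem max3 (a b c : Int) (h : b ≤ c) : max (max a b) c = max a c := by
  rw [max_assoc, max_eq_right h]

theorem inv (l : List Char) (segs : List (List Char)) (cur : List Char) :
    l.foldl fooStep (max (candMax segs) (cand cur), (cur.length : Int), cand cur, hasUp cur)
      = ((fun st : List (List Char) × List Char =>
          (max (candMax st.1) (cand st.2), (st.2.length : Int), cand st.2, hasUp st.2))
         (l.foldl fooAltStep (segs, cur))) := by
  induction l generalizing segs cur with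
  | nil => rfl
  | cons ch t ih =>
    rw [List.foldl_cons, List.foldl_cons]
    by_cases hd : ('0' ≤ ch ∧ ch ≤ '9')
    · have hA : fooStep (max (candMax segs) (cand cur), (cur.length : Int), cand cur, hasUp cur) ch
          = (max (candMax (segs ++ [cur])) (cand ([] : List Char)),
             (([] : List Char).length : Int), cand ([] : List Char), hasUp ([] : List Char)) := by
        simp only [fooStep, digit_mem, upper_mem, decide_eq_true_eq]
        rw [if_pos hd, if_neg (digit_not_upper ch hd)]
        simp only [candMax_append]
        simp [cand, hasUp]
      have hB : fooAltStep (segs, cur) ch = (segs ++ [cur], ([] : List Char)) := by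
        simp [fooAltStep, hd]
      rw [hA, hB, ih]
    · have hlen : ((cur ++ [ch]).length : Int) = (cur.length : Int) + 1 := by simp
      have hA : fooStep (max (candMax segs) (cand cur), (cur.length : Int), cand cur, hasUp cur) ch
          = (max (candMax segs) (cand (cur ++ [ch])), ((cur ++ [ch]).length : Int),
             cand (cur ++ [ch]), hasUp (cur ++ [ch])) := by
        simp only [fooStep, digit_mem, upper_mem, decide_eq_true_eq]
        rw [if_neg hd]
        by_cases hu : ('A' ≤ ch ∧ ch ≤ 'Z')
        · have hUp : hasUp (cur ++ [ch]) = true := by simp [hasUp_append, hu]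
          have hc : cand (cur ++ [ch]) = (cur.length : Int) + 1 := by
            simp [cand, hUp]
          have hle : cand cur ≤ (cur.length : Int) + 1 :=
            le_trans (cand_le_len cur) (by omega)
          rw [if_pos hu]
          simp only [if_true, hc, hUp, hlen, max3 _ _ _ hle]
        · have hUp : hasUp (cur ++ [ch]) = hasUp cur := by
            simp [hasUp_append, hu]
          rw [if_neg hu]
          by_cases hcu : hasUp cur = true
          · have hc : cand (cur ++ [ch]) = (cur.length : Int) + 1 := by
              simp [cand, hUp, hcu]
            have hle : cand cur ≤ (cur.length : Int) + 1 :=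
              le_trans (cand_le_len cur) (by omega)
            simp only [hcu, if_true, hc, hUp, hlen, max3 _ _ _ hle]
          · have hcu' : hasUp cur = false := by simpa using hcu
            have hc : cand (cur ++ [ch]) = 0 := by simp [cand, hUp, hcu']
            have hc0 : cand cur = 0 := by simp [cand, hcu']
            have h2 : 0 ≤ max (candMax segs) (cand cur) := le_max_of_le_right (cand_nonneg cur)
            simp only [hcu', if_false, hc, hc0, hUp, hlen, Bool.false_eq_true,
              max_eq_left (le_max_right (candMax segs) (0 : Int))]
      have hB : fooAltStep (segs, cur) ch = (segs, cur ++ [ch]) := by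
        simp [fooAltStep, hd]
      rw [hA, hB, ih]

theorem le_foldl_max (t : List Int) (x : Int) : x ≤ t.foldl max x := by
  induction t generalizing x with
  | nil => exact le_refl x
  | cons h tl ih => exact le_trans (le_max_left x h) (ih (max x h))

theorem candMax_filter (S : List (List Char)) (m : Int) (hm : 0 ≤ m) :
    S.foldl (fun m seg => max m (cand seg)) m
      = ((S.filter hasUp).map (fun seg => (seg.length : Int))).foldl max m := by
  induction S generalizing m with
  | nil => rfl
  | cons seg t ih =>
    by_cases h : hasUp seg = true
    · have hc : cand seg = (seg.length : Int) := by simp [cand, h]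
      simp only [List.foldl_cons, List.filter_cons, h, if_true, List.map_cons, List.foldl_cons, hc]
      exact ih _ (le_max_of_le_left hm)
    · have hc : cand seg = 0 := by simp [cand, h]
      simp only [List.foldl_cons, List.filter_cons, h, Bool.false_eq_true, if_false, hc,
        max_eq_left hm]
      exact ih _ hm

theorem lens_pos (S : List (List Char)) (y : Int)
    (hy : y ∈ (S.filter hasUp).map (fun seg => (seg.length : Int))) : 1 ≤ y := by
  rcases List.mem_map.mp hy with ⟨seg, hseg, rfl⟩
  have h := List.of_mem_filter hseg
  have : seg ≠ [] := by
    intro h0; subst h0; simp [hasUp] at h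
  have : 0 < seg.length := List.length_pos_iff.mpr this
  omega

theorem final_eq (S : List (List Char)) :
    (if candMax S = 0 then (-1 : Int) else candMax S)
      = (match (S.filter hasUp).map (fun seg => (seg.length : Int)) with
         | [] => (-1 : Int)
         | x :: t => t.foldl max x) := by
  have h := candMax_filter S 0 (le_refl 0)
  rcases hL : (S.filter hasUp).map (fun seg => (seg.length : Int)) with _ | ⟨x, t⟩
  · have : candMax S = 0 := by rw [candMax, h, hL]; rfl
    simp [hL, this]
  · have hx : 1 ≤ x := lens_pos S x (by rw [hL]; exact List.mem_cons_self)
    have hcM : candMax S = t.foldl max x := by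
      rw [candMax, h, hL, List.foldl_cons, max_eq_right (by omega : (0:Int) ≤ x)]
    have : 1 ≤ candMax S := by rw [hcM]; exact le_trans hx (le_foldl_max t x)
    simp only [hL]
    rw [if_neg (by omega), hcM]

-- ===== VERDICT (by name: the statement is the Claim_ definition above) =====
theorem foo_spec : Claim_equal_foo := by
  intro s _
  show foo s = foo_alt s
  have foo_eq : foo s = (if (s.toList.foldl fooStep (0, 0, 0, false)).1 = 0 then -1
      else (s.toList.foldl fooStep (0, 0, 0, false)).1) := rfl
  have foo_alt_eq : foo_alt s =
      (match (((s.toList.foldl fooAltStep ([], [])).1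
                ++ [(s.toList.foldl fooAltStep ([], [])).2]).filter hasUp).map
              (fun seg => (seg.length : Int)) with
       | [] => (-1 : Int)
       | x :: t => t.foldl max x) := rfl
  have h0 : ((max (candMax []) (cand []), ((([] : List Char)).length : Int), cand [], hasUp [])
      : Int × Int × Int × Bool) = ((0 : Int), (0 : Int), (0 : Int), false) := rfl
  have h := inv s.toList [] []
  rw [h0] at h
  have h1 : (s.toList.foldl fooStep (0, 0, 0, false)).1
      = candMax ((s.toList.foldl fooAltStep ([], [])).1
                  ++ [(s.toList.foldl fooAltStep ([], [])).2]) := by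
    rw [h, candMax_append]
  rw [foo_eq, foo_alt_eq, h1]
  exact final_eq _
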